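-- pv_equiv track=rewrite | github.com/SAlgorithmStudy6/AlgorithmStudy | 07.28/이지윤/[2502]떡먹는호랑이.py | solution
-- ===== SOURCE A (Python) =====
-- def is_fibo(_arr, _d) -> bool:
--     for i in range(3, _d) :
--         _arr[i] = _arr[i - 1] + _arr[i - 2]
--     if _arr[_d] == _arr[_d - 1] + _arr[_d - 2] : return True
--     else : return False
--
-- def solution(_arr, _d, _limit) -> (int, int):
--     count = 1
--     while count < _limit + 1:           # index <= limit
--         for i in range(count, _limit + 1):  # index <= limit
--             _arr[1], _arr[2] = count, i
--             if is_fibo(_arr, _d): return _arr[1], _arr[2]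
--         count += 1
--     return -1, -1
-- ===== SOURCE B (Python) =====
-- def solution(_arr, _d, _limit):
--     # Search the same space (1 <= a <= b <= limit) but solve for b directly:
--     # simulate the fill symbolically once, getting a linear equation alpha*a + beta*b = gamma.
--     if _limit < 1:
--         return -1, -1
--     sym = [(0, 0, v) for v in _arr]   # value at index j is ca*a + cb*b + c0
--     sym[1] = (1, 0, 0)
--     sym[2] = (0, 1, 0)
--     for k in range(3, _d):
--         p, q = sym[k - 1], sym[k - 2]
--         sym[k] = (p[0] + q[0], p[1] + q[1], p[2] + q[2])
--     t0, t1, t2 = sym[_d], sym[_d - 1], sym[_d - 2]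
--     alpha = t1[0] + t2[0] - t0[0]
--     beta = t1[1] + t2[1] - t0[1]
--     gamma = t0[2] - t1[2] - t2[2]
--     for a in range(1, _limit + 1):
--         if beta == 0:
--             if alpha * a == gamma:
--                 return a, a
--         else:
--             num = gamma - alpha * a
--             if num % beta == 0:
--                 b = num // beta
--                 if a <= b <= _limit:
--                     return a, b
--     return -1, -1
-- ===== Notes on version B (the rewrite author's own statement) =====
-- stated objective: faster
-- what changed: A scans every pair (a,b) with a<=b<=limit and re-runs the whole Fibonacci fill for each; B runs the fill once symbolically over linear coefficient triples, obtaining a linear equation alpha*a + beta*b = gamma, and then for each a solves for b directly by exact division and a range check.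
import Mathlib
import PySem

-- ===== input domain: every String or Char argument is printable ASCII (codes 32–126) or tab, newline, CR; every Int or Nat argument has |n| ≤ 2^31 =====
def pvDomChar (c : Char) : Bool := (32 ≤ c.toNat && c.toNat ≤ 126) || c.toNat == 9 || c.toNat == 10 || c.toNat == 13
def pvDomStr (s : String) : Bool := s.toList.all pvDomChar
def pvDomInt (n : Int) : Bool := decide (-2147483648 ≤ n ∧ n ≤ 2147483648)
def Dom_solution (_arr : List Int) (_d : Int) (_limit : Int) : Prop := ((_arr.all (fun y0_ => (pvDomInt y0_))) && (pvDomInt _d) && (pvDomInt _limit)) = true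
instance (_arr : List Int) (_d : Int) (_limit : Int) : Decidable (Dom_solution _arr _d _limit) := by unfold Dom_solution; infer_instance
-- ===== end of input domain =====

-- B replaces A's scan of all pairs (each re-running the whole fill) by one symbolic fill that
-- yields a linear equation alpha*a + beta*b = gamma, then solves for b directly per a (objective: faster).
-- Python A mutates _arr in place; both ports are pure, so the equivalence proved is about the return value only.

-- ===== PORT A =====
-- 'for i in range(3, _d): _arr[i] = _arr[i-1] + _arr[i-2]'
def fibFill (arr : List Int) (k d : Int) : Option (List Int) :=
  if _h : k < d then
    match PySem.List.pyGet? arr (k - 1), PySem.List.pyGet? arr (k - 2) with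
    | some x, some y =>
      match PySem.List.pySet? arr k (x + y) with
      | some arr' => fibFill arr' (k + 1) d
      | none => none
    | _, _ => none
  else some arr
termination_by (d - k).toNat
decreasing_by omega

-- is_fibo(_arr, _d): fill, then test _arr[_d] == _arr[_d-1] + _arr[_d-2]
def isFibo (arr : List Int) (d : Int) : Option (List Int × Bool) :=
  (fibFill arr 3 d).bind fun arr' =>
  (PySem.List.pyGet? arr' d).bind fun x =>
  (PySem.List.pyGet? arr' (d - 1)).bind fun y =>
  (PySem.List.pyGet? arr' (d - 2)).bind fun z =>
  some (arr', x == y + z)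

-- 'for i in range(count, _limit + 1): …' with the early return carried as an Option result
def innerLoop (arr : List Int) (d count limit i : Int) : Option (List Int × Option (List Int)) :=
  if _h : i < limit + 1 then
    (PySem.List.pySet? arr 1 count).bind fun a1 =>
    (PySem.List.pySet? a1 2 i).bind fun a2 =>
    (isFibo a2 d).bind fun r =>
    if r.2 then
      (PySem.List.pyGet? r.1 1).bind fun v1 =>
      (PySem.List.pyGet? r.1 2).bind fun v2 =>
      some (r.1, some [v1, v2])
    else innerLoop r.1 d count limit (i + 1)
  else some (arr, none)
termination_by (limit + 1 - i).toNat
decreasing_by omega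

-- 'while count < _limit + 1: …'
def outerLoop (arr : List Int) (d limit count : Int) : Option (List Int) :=
  if _h : count < limit + 1 then
    (innerLoop arr d count limit count).bind fun pr =>
    match pr.2 with
    | some r => some r
    | none => outerLoop pr.1 d limit (count + 1)
  else some [-1, -1]
termination_by (limit + 1 - count).toNat
decreasing_by omega

def solution (_arr : List Int) (_d : Int) (_limit : Int) : List Int :=
  (outerLoop _arr _d _limit 1).getD [-1, -1]

-- ===== PORT B =====
-- 'for k in range(3, _d): sym[k] = componentwise sum of sym[k-1] and sym[k-2]'
def symFill (s : List (Int × Int × Int)) (k d : Int) : Option (List (Int × Int × Int)) :=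
  if _h : k < d then
    match PySem.List.pyGet? s (k - 1), PySem.List.pyGet? s (k - 2) with
    | some p, some q =>
      match PySem.List.pySet? s k (p.1 + q.1, p.2.1 + q.2.1, p.2.2 + q.2.2) with
      | some s' => symFill s' (k + 1) d
      | none => none
    | _, _ => none
  else some s
termination_by (d - k).toNat
decreasing_by omega

-- builds sym and extracts the coefficients (alpha, beta, gamma) of alpha*a + beta*b = gamma
def coeffs (arr : List Int) (d : Int) : Option (Int × Int × Int) :=
  let s0 : List (Int × Int × Int) := arr.map (fun v => (0, 0, v))
  (PySem.List.pySet? s0 1 (1, 0, 0)).bind fun s1 =>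
  (PySem.List.pySet? s1 2 (0, 1, 0)).bind fun s2 =>
  (symFill s2 3 d).bind fun s =>
  (PySem.List.pyGet? s d).bind fun t0 =>
  (PySem.List.pyGet? s (d - 1)).bind fun t1 =>
  (PySem.List.pyGet? s (d - 2)).bind fun t2 =>
  some (t1.1 + t2.1 - t0.1, t1.2.1 + t2.2.1 - t0.2.1, t0.2.2 - t1.2.2 - t2.2.2)

-- 'for a in range(1, _limit + 1): …' solving the equation for b instead of scanning b
def searchB (al be ga limit a : Int) : List Int :=
  if _h : a < limit + 1 then
    if be == 0 then
      if al * a == ga then [a, a] else searchB al be ga limit (a + 1)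
    else
      let num := ga - al * a
      if PySem.Int.mod num be == 0 then
        let b := PySem.Int.floordiv num be
        if a ≤ b ∧ b ≤ limit then [a, b] else searchB al be ga limit (a + 1)
      else searchB al be ga limit (a + 1)
  else [-1, -1]
termination_by (limit + 1 - a).toNat
decreasing_by all_goals omega

def solution_alt (_arr : List Int) (_d : Int) (_limit : Int) : List Int :=
  if _limit < 1 then [-1, -1]
  else
    match coeffs _arr _d with
    | some c => searchB c.1 c.2.1 c.2.2 _limit 1
    | none => [-1, -1]

-- ===== PRECONDITION & SPEC =====
-- Pre_ excludes exactly the inputs on which A raises IndexError: whenever the search space is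
-- nonempty (limit ≥ 1), A writes _arr[1], _arr[2] and _arr[3.._d-1] and reads _arr[_d-2.._d]
-- with Python wraparound, so it raises unless len(_arr) ≥ 3 and 2 - len ≤ _d ≤ len - 1.
def Pre_solution (_arr : List Int) (_d : Int) (_limit : Int) : Prop :=
  _limit < 1 ∨ (3 ≤ (_arr.length : Int) ∧ 2 - (_arr.length : Int) ≤ _d ∧ _d ≤ (_arr.length : Int) - 1)
instance (_arr : List Int) (_d : Int) (_limit : Int) : Decidable (Pre_solution _arr _d _limit) := by unfold Pre_solution; infer_instance

def pvWitness_solution : List Int × Int × Int := ([2, 0, 0, 3], 3, 3)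

def Spec_solution (_arr : List Int) (_d : Int) (_limit : Int) (out : List Int) : Prop := out = solution_alt _arr _d _limit
instance (_arr : List Int) (_d : Int) (_limit : Int) (out : List Int) : Decidable (Spec_solution _arr _d _limit out) := by unfold Spec_solution; infer_instance

-- ===== CLAIM (what is proved, stated in full; the proofs are below) =====
def Claim_equal_solution : Prop := ∀ (_arr : List Int) (_d : Int) (_limit : Int), Dom_solution _arr _d _limit → Pre_solution _arr _d _limit → Spec_solution _arr _d _limit (solution _arr _d _limit)

-- ===== LEMMAS AND PROOFS =====

-- the value of a symbolic triple (ca, cb, c0) at parameters (a, b)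
def evalT (a b : Int) (t : Int × Int × Int) : Int := t.1 * a + t.2.1 * b + t.2.2

-- positions written by one trial of A: indices 1, 2 and the filled range 3.._d-1
def Wr (d : Int) (j : Nat) : Prop := j = 1 ∨ j = 2 ∨ (3 ≤ (j : Int) ∧ (j : Int) < d)

-- A's loop-carried state: the original values survive at every unwritten position
def ArrInv (arr arr' : List Int) (d : Int) : Prop :=
  arr'.length = arr.length ∧ ∀ j : Nat, ¬ Wr d j → arr'[j]? = arr[j]?

theorem pySet?_pos {α : Type} (l : List α) (i : Int) (v : α) (h0 : 0 ≤ i) (h1 : i < (l.length : Int)) :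
    PySem.List.pySet? l i v = some (l.set i.toNat v) := by
  simp only [PySem.List.pySet?, PySem.List.pyIdx?]
  split_ifs
  all_goals simp_all

theorem pyGet?_map_evalT (a b : Int) (s : List (Int × Int × Int)) (i : Int) :
    PySem.List.pyGet? (s.map (evalT a b)) i = (PySem.List.pyGet? s i).map (evalT a b) := by
  simp [PySem.List.pyGet?]

theorem fill_bridge (a b d : Int) : ∀ (m : Nat) (k : Int) (u : List Int) (s : List (Int × Int × Int)),
    3 ≤ k → (d - k).toNat = m → u.length = s.length → d ≤ (s.length : Int) →
    (∀ j : Nat, ((j : Int) < k ∨ d ≤ (j : Int)) → u[j]? = (s.map (evalT a b))[j]?) →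
    ∃ s', symFill s k d = some s' ∧ s'.length = s.length ∧
      fibFill u k d = some (s'.map (evalT a b)) ∧
      (∀ j : Nat, ((j : Int) < k ∨ d ≤ (j : Int)) → s'[j]? = s[j]?) := by
  intro m
  induction m with
  | zero =>
    intro k u s hk hm hlen hd hagree
    have hkd : ¬ k < d := by omega
    refine ⟨s, ?_, rfl, ?_, fun j _ => rfl⟩
    · rw [symFill]; simp [hkd]
    · rw [fibFill]; simp [hkd]
      apply List.ext_getElem?
      intro j
      exact hagree j (by omega)
  | succ m ih =>
    intro k u s hk hm hlen hd hagree
    have hkd : k < d := by omega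
    -- the two reads on s succeed
    obtain ⟨p, hp⟩ : ∃ p, PySem.List.pyGet? s (k - 1) = some p := by
      cases h : PySem.List.pyGet? s (k - 1) with
      | some p => exact ⟨p, rfl⟩
      | none =>
        rw [PySem.List.pyGet?_eq_none_iff] at h
        exact absurd (by simp [PySem.Raise.InRange]; omega) h
    obtain ⟨q, hq⟩ : ∃ q, PySem.List.pyGet? s (k - 2) = some q := by
      cases h : PySem.List.pyGet? s (k - 2) with
      | some q => exact ⟨q, rfl⟩
      | none =>
        rw [PySem.List.pyGet?_eq_none_iff] at h
        exact absurd (by simp [PySem.Raise.InRange]; omega) h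
    -- the corresponding reads on u
    have hup : PySem.List.pyGet? u (k - 1) = some (evalT a b p) := by
      rw [PySem.List.pyGet?_of_nonneg _ (show (0:Int) ≤ k-1 by omega)]
      rw [hagree (k-1).toNat (by omega)]
      rw [PySem.List.pyGet?_of_nonneg _ (show (0:Int) ≤ k-1 by omega)] at hp
      simp only [List.getElem?_map, hp, Option.map_some]
    have huq : PySem.List.pyGet? u (k - 2) = some (evalT a b q) := by
      rw [PySem.List.pyGet?_of_nonneg _ (show (0:Int) ≤ k-2 by omega)]
      rw [hagree (k-2).toNat (by omega)]
      rw [PySem.List.pyGet?_of_nonneg _ (show (0:Int) ≤ k-2 by omega)] at hq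
      simp only [List.getElem?_map, hq, Option.map_some]
    -- the writes
    have hsetS := pySet?_pos s k (p.1 + q.1, p.2.1 + q.2.1, p.2.2 + q.2.2) (by omega) (by omega)
    have hsetU := pySet?_pos u k (evalT a b p + evalT a b q) (by omega) (by omega)
    set t : Int × Int × Int := (p.1 + q.1, p.2.1 + q.2.1, p.2.2 + q.2.2) with ht
    have hevalt : evalT a b p + evalT a b q = evalT a b t := by simp [evalT, ht]; ring
    -- apply the IH to the updated lists
    have hagree' : ∀ j : Nat, ((j : Int) < k + 1 ∨ d ≤ (j : Int)) →
        (u.set k.toNat (evalT a b p + evalT a b q))[j]? = ((s.set k.toNat t).map (evalT a b))[j]? := by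
      intro j hj
      rw [List.map_set]
      by_cases hjk : j = k.toNat
      · subst hjk
        rw [List.getElem?_set_self (by omega), List.getElem?_set_self (by simp; omega)]
        rw [hevalt]
      · rw [List.getElem?_set_ne (by omega), List.getElem?_set_ne (by omega)]
        exact hagree j (by omega)
    obtain ⟨s', hsym, hlen', hfib, hpres⟩ := ih (k+1) (u.set k.toNat (evalT a b p + evalT a b q))
      (s.set k.toNat t) (by omega) (by omega) (by simp [hlen]) (by simp; omega) hagree'
    refine ⟨s', ?_, by simp_all, ?_, ?_⟩
    · rw [symFill]; simp only [hkd, dif_pos, hp, hq]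
      rw [hsetS]; exact hsym
    · rw [fibFill]; simp only [hkd, dif_pos, hup, huq]
      rw [hsetU]; exact hfib
    · intro j hj
      rw [hpres j (by omega), List.getElem?_set_ne (by omega)]

theorem coeffs_spec (arr : List Int) (d : Int)
    (h3 : 3 ≤ (arr.length : Int)) (hlo : 2 - (arr.length : Int) ≤ d) (hhi : d ≤ (arr.length : Int) - 1) :
    ∃ al be ga, coeffs arr d = some (al, be, ga) ∧
      ∀ arr' : List Int, ArrInv arr arr' d → ∀ a b : Int,
        ∃ arr3, ((PySem.List.pySet? arr' 1 a).bind fun a1 =>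
                  (PySem.List.pySet? a1 2 b).bind fun a2 => isFibo a2 d)
            = some (arr3, decide (al * a + be * b = ga)) ∧
          ArrInv arr arr3 d ∧ arr3[1]? = some a ∧ arr3[2]? = some b := by
  set n := arr.length with hn
  set s0 : List (Int × Int × Int) := arr.map (fun v => (0, 0, v)) with hs0
  have hlen0 : s0.length = n := by simp [hs0, ← hn]
  set s1 := s0.set 1 (1, 0, 0) with hs1
  set s2 := s1.set 2 (0, 1, 0) with hs2
  have hlen2 : s2.length = n := by simp [hs2, hs1, hlen0]
  have hset1 : PySem.List.pySet? s0 (1:Int) ((1:Int), (0:Int), (0:Int)) = some s1 := by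
    rw [pySet?_pos _ _ _ (by omega) (by omega)]; rfl
  have hset2 : PySem.List.pySet? s1 (2:Int) ((0:Int), (1:Int), (0:Int)) = some s2 := by
    rw [pySet?_pos _ _ _ (by omega) (by simp [hs1, hlen0]; omega)]; rfl
  -- one application of fill_bridge just to obtain symFill's success
  obtain ⟨s', hsym, hlen', _, hpres⟩ := fill_bridge 0 0 d (d - 3).toNat 3 (s2.map (evalT 0 0)) s2
    (by omega) rfl (by simp) (by omega) (fun j _ => rfl)
  -- the three reads on s' succeed
  have hread : ∀ i : Int, -(n:Int) ≤ i → i < n → ∃ t, PySem.List.pyGet? s' i = some t := by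
    intro i h1 h2
    cases h : PySem.List.pyGet? s' i with
    | some t => exact ⟨t, rfl⟩
    | none =>
      rw [PySem.List.pyGet?_eq_none_iff] at h
      exact absurd (by simp [PySem.Raise.InRange, hlen', hlen2]; omega) h
  obtain ⟨t0, ht0⟩ := hread d (by omega) (by omega)
  obtain ⟨t1, ht1⟩ := hread (d-1) (by omega) (by omega)
  obtain ⟨t2, ht2⟩ := hread (d-2) (by omega) (by omega)
  refine ⟨t1.1 + t2.1 - t0.1, t1.2.1 + t2.2.1 - t0.2.1, t0.2.2 - t1.2.2 - t2.2.2, ?_, ?_⟩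
  · simp only [coeffs]
    rw [← hs0, hset1]
    simp only [Option.bind_some]
    rw [hset2]
    simp only [Option.bind_some]
    rw [hsym]
    simp only [Option.bind_some]
    rw [ht0]
    simp only [Option.bind_some]
    rw [ht1]
    simp only [Option.bind_some]
    rw [ht2]
    simp only [Option.bind_some]
  · intro arr' hI a b
    obtain ⟨hlenI, hvalI⟩ := hI
    have hset1' : PySem.List.pySet? arr' (1:Int) a = some (arr'.set 1 a) := by
      rw [pySet?_pos _ _ _ (by omega) (by omega)]; rfl
    have hset2' : PySem.List.pySet? (arr'.set 1 a) (2:Int) b = some ((arr'.set 1 a).set 2 b) := by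
      rw [pySet?_pos _ _ _ (by omega) (by simp; omega)]; rfl
    set u0 := (arr'.set 1 a).set 2 b with hu0
    have hagree0 : ∀ j : Nat, ((j : Int) < 3 ∨ d ≤ (j : Int)) → u0[j]? = (s2.map (evalT a b))[j]? := by
      intro j hj
      rw [hu0, hs2, hs1, List.map_set, List.map_set]
      by_cases hj2 : j = 2
      · subst hj2
        rw [List.getElem?_set_self (by simp; omega),
            List.getElem?_set_self (by simp [hlen0]; omega)]
        simp [evalT]
      · rw [List.getElem?_set_ne (show 2 ≠ j by omega), List.getElem?_set_ne (show 2 ≠ j by omega)]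
        by_cases hj1 : j = 1
        · subst hj1
          rw [List.getElem?_set_self (by omega), List.getElem?_set_self (by simp [hlen0]; omega)]
          simp [evalT]
        · rw [List.getElem?_set_ne (show 1 ≠ j by omega), List.getElem?_set_ne (show 1 ≠ j by omega)]
          rw [hvalI j (by simp [Wr]; omega)]
          rw [hs0, List.getElem?_map, List.getElem?_map]
          cases arr[j]? <;> simp [evalT]
    obtain ⟨s'2, hsym2, _, hfib2, hpres2⟩ := fill_bridge a b d (d - 3).toNat 3 u0 s2
      (by omega) rfl (by simp [hu0, hlenI]; omega) (by omega) hagree0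
    have hs'eq : s'2 = s' := by rw [hsym] at hsym2; exact (Option.some_inj.mp hsym2.symm)
    subst hs'eq
    refine ⟨s'2.map (evalT a b), ?_, ?_, ?_, ?_⟩
    · rw [hset1', Option.bind_some, hset2', Option.bind_some]
      simp only [isFibo]
      rw [hfib2, Option.bind_some, pyGet?_map_evalT, pyGet?_map_evalT, pyGet?_map_evalT,
          ht0, ht1, ht2]
      simp only [Option.map_some, Option.bind_some, Option.some_inj]
      refine Prod.ext rfl ?_
      show (evalT a b t0 == evalT a b t1 + evalT a b t2) = _
      by_cases hP : (t1.1 + t2.1 - t0.1) * a + (t1.2.1 + t2.2.1 - t0.2.1) * b = t0.2.2 - t1.2.2 - t2.2.2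
      · simp only [hP, decide_true]
        rw [beq_iff_eq]
        simp only [evalT]
        linear_combination (-1 : Int) * hP
      · simp only [hP, decide_false]
        rw [beq_eq_false_iff_ne]
        intro heq
        apply hP
        simp only [evalT] at heq
        linear_combination (-1 : Int) * heq
    · constructor
      · simp [hlen', hlen2, ← hn]
      · intro j hWr
        simp only [Wr, not_or] at hWr
        rw [List.getElem?_map, hpres2 j (by omega)]
        rw [hs2, hs1, List.getElem?_set_ne (by omega), List.getElem?_set_ne (by omega)]
        rw [hs0, List.getElem?_map]
        cases arr[j]? <;> simp [evalT]
    · rw [List.getElem?_map, hpres2 1 (by omega)]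
      rw [hs2, hs1, List.getElem?_set_ne (by omega), List.getElem?_set_self (by omega)]
      simp [evalT]
    · rw [List.getElem?_map, hpres2 2 (by omega)]
      rw [hs2, List.getElem?_set_self (by simp [hs1, hlen0]; omega)]
      simp [evalT]

def cand (al be ga limit a i : Int) : Option (List Int) :=
  if be = 0 then (if al * a = ga ∧ i < limit + 1 then some [a, i] else none)
  else (if PySem.Int.mod (ga - al * a) be = 0 ∧ i ≤ PySem.Int.floordiv (ga - al * a) be ∧ PySem.Int.floordiv (ga - al * a) be ≤ limit
        then some [a, PySem.Int.floordiv (ga - al * a) be] else none)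

theorem inner_eq (arr : List Int) (d limit al be ga : Int)
    (htrial : ∀ arr' : List Int, ArrInv arr arr' d → ∀ a b : Int,
        ∃ arr3, ((PySem.List.pySet? arr' 1 a).bind fun a1 =>
                  (PySem.List.pySet? a1 2 b).bind fun a2 => isFibo a2 d)
            = some (arr3, decide (al * a + be * b = ga)) ∧
          ArrInv arr arr3 d ∧ arr3[1]? = some a ∧ arr3[2]? = some b) :
    ∀ (m : Nat) (a i : Int) (arr' : List Int), (limit + 1 - i).toNat = m → ArrInv arr arr' d →
    ∃ arrF, innerLoop arr' d a limit i = some (arrF, cand al be ga limit a i) ∧ ArrInv arr arrF d := by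
  intro m
  induction m with
  | zero =>
    intro a i arr' hm hI
    have hil : ¬ i < limit + 1 := by omega
    refine ⟨arr', ?_, hI⟩
    rw [innerLoop]
    simp only [hil, dif_neg, not_false_iff]
    congr 1
    refine Prod.ext rfl ?_
    show (none : Option (List Int)) = cand al be ga limit a i
    unfold cand
    split_ifs with h1 h2 h3 <;> try rfl
    · exact absurd h2.2 hil
    · exfalso; omega
  | succ m ih =>
    intro a i arr' hm hI
    have hil : i < limit + 1 := by omega
    obtain ⟨arr3, hchain, hI3, hg1, hg2⟩ := htrial arr' hI a i
    rw [innerLoop]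
    simp only [hil, dif_pos]
    -- decompose the bind chain using hchain
    cases hx1 : PySem.List.pySet? arr' 1 a with
    | none => rw [hx1] at hchain; simp at hchain
    | some a1 =>
    rw [hx1] at hchain
    simp only [Option.bind_some] at hchain ⊢
    cases hx2 : PySem.List.pySet? a1 2 i with
    | none => rw [hx2] at hchain; simp at hchain
    | some a2 =>
    rw [hx2] at hchain
    simp only [Option.bind_some] at hchain ⊢
    rw [hchain]
    simp only [Option.bind_some]
    by_cases hP : al * a + be * i = ga
    · simp only [hP, decide_true]
      rw [PySem.List.pyGet?_of_nonneg _ (by omega : (0:Int) ≤ 1),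
          PySem.List.pyGet?_of_nonneg _ (by omega : (0:Int) ≤ 2)]
      norm_num
      simp only [show Int.toNat 2 = 2 from rfl]
      rw [hg1, hg2]
      simp only [Option.bind_some]
      refine ⟨arr3, ?_, hI3⟩
      congr 2
      unfold cand
      by_cases hbe : be = 0
      · have : al * a = ga := by rw [hbe] at hP; linarith
        simp [hbe, this, hil]
      · have hdvd : PySem.Int.mod (ga - al * a) be = 0 := by
          rw [PySem.Int.mod_eq_zero_iff_dvd]
          exact ⟨i, by linarith⟩
        have hq : PySem.Int.floordiv (ga - al * a) be = i := by
          have h := PySem.Int.floordiv_mul_add_mod (ga - al * a) be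
          rw [hdvd] at h
          have : PySem.Int.floordiv (ga - al * a) be * be = i * be := by linarith
          exact mul_right_cancel₀ hbe this
        simp only [hbe, if_false, hdvd, hq]
        simp
        omega
    · simp only [hP, decide_false]
      norm_num
      obtain ⟨arrF, hrec, hIF⟩ := ih a (i + 1) arr3 (by omega) hI3
      rw [hrec]
      refine ⟨arrF, ?_, hIF⟩
      congr 2
      unfold cand
      by_cases hbe : be = 0
      · have : ¬ al * a = ga := fun h => hP (by rw [hbe]; linarith)
        simp [hbe, this]
      · by_cases hdvd : PySem.Int.mod (ga - al * a) be = 0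
        · have hiq : i ≠ PySem.Int.floordiv (ga - al * a) be := by
            intro h
            apply hP
            have hh := PySem.Int.floordiv_mul_add_mod (ga - al * a) be
            rw [hdvd, ← h] at hh
            linarith
          simp only [hbe, if_false]
          by_cases h2 : i ≤ PySem.Int.floordiv (ga - al * a) be ∧ PySem.Int.floordiv (ga - al * a) be ≤ limit
          · rw [if_pos ⟨hdvd, by omega⟩, if_pos ⟨hdvd, h2⟩]
          · rw [if_neg (by rw [not_and_or] at h2 ⊢; omega), if_neg (by tauto)]
        · simp [hbe, hdvd]

theorem outer_eq (arr : List Int) (d limit al be ga : Int)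
    (htrial : ∀ arr' : List Int, ArrInv arr arr' d → ∀ a b : Int,
        ∃ arr3, ((PySem.List.pySet? arr' 1 a).bind fun a1 =>
                  (PySem.List.pySet? a1 2 b).bind fun a2 => isFibo a2 d)
            = some (arr3, decide (al * a + be * b = ga)) ∧
          ArrInv arr arr3 d ∧ arr3[1]? = some a ∧ arr3[2]? = some b) :
    ∀ (m : Nat) (count : Int) (arr' : List Int), (limit + 1 - count).toNat = m → ArrInv arr arr' d →
    outerLoop arr' d limit count = some (searchB al be ga limit count) := by
  intro m
  induction m with
  | zero =>
    intro count arr' hm hI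
    have hc : ¬ count < limit + 1 := by omega
    rw [outerLoop, searchB]
    simp [hc]
  | succ m ih =>
    intro count arr' hm hI
    have hc : count < limit + 1 := by omega
    obtain ⟨arrF, hinner, hIF⟩ := inner_eq arr d limit al be ga htrial (limit + 1 - count).toNat
      count count arr' rfl hI
    rw [outerLoop]
    simp only [hc, dif_pos]
    rw [hinner]
    simp only [Option.bind_some]
    by_cases hbe : be = 0
    · subst hbe
      by_cases hP : al * count = ga
      · have hcv : cand al 0 ga limit count count = some [count, count] := by
          unfold cand; simp [hP, hc]
        rw [hcv, searchB]
        simp [hc, hP]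
      · have hcv : cand al 0 ga limit count count = none := by
          unfold cand; simp [hP]
        rw [hcv, searchB]
        simp only [hc, dif_pos]
        simp [hP]
        exact ih (count + 1) arrF (by omega) hIF
    · by_cases hdvd : PySem.Int.mod (ga - al * count) be = 0
      · by_cases hrange : count ≤ PySem.Int.floordiv (ga - al * count) be ∧ PySem.Int.floordiv (ga - al * count) be ≤ limit
        · have hcv : cand al be ga limit count count = some [count, PySem.Int.floordiv (ga - al * count) be] := by
            unfold cand; simp [hbe, hdvd, hrange]
          rw [hcv, searchB]
          simp [hc, hbe, hdvd, hrange]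
        · have hcv : cand al be ga limit count count = none := by
            unfold cand; simp [hbe, hdvd, hrange]
          rw [hcv, searchB]
          simp only [hc, dif_pos]
          simp [hbe, hdvd, hrange]
          exact ih (count + 1) arrF (by omega) hIF
      · have hcv : cand al be ga limit count count = none := by
          unfold cand; simp [hbe, hdvd]
        rw [hcv, searchB]
        simp only [hc, dif_pos]
        simp [hbe, hdvd]
        exact ih (count + 1) arrF (by omega) hIF

theorem solution_eq_alt (arr : List Int) (d limit : Int)
    (hpre : limit < 1 ∨ (3 ≤ (arr.length : Int) ∧ 2 - (arr.length : Int) ≤ d ∧ d ≤ (arr.length : Int) - 1)) :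
    solution arr d limit = solution_alt arr d limit := by
  unfold solution solution_alt
  by_cases hl : limit < 1
  · have h1 : ¬ (1:Int) < limit + 1 := by omega
    rw [outerLoop]
    simp [h1, hl]
  · obtain ⟨h3, hlo, hhi⟩ := hpre.resolve_left hl
    obtain ⟨al, be, ga, hco, htrial⟩ := coeffs_spec arr d h3 hlo hhi
    rw [outer_eq arr d limit al be ga htrial (limit + 1 - 1).toNat 1 arr rfl ⟨rfl, fun j _ => rfl⟩]
    simp [hl, hco]

-- ===== VERDICT (by name: the statement is the Claim_ definition above) =====
theorem solution_spec : Claim_equal_solution := by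
  intro arr d limit _ hpre
  unfold Spec_solution
  unfold Pre_solution at hpre
  exact solution_eq_alt arr d limit hpre
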